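-- pv_equiv track=rewrite | github.com/javileyes/juego-conversacional | server_conv_mac_silicon.py | ajustar_contexto
-- ===== SOURCE A (Python) =====
-- def encontrar_coincidencia(texto, cadena_busqueda="<|eot_id|>"):
--     """
--     Esta función busca la primera aparición de una cadena de búsqueda en un texto dado y devuelve el substring
--     desde el principio del texto hasta el final de esta coincidencia (incluida).
--
--     Parámetros:
--     texto (str): El texto en el que se buscará la cadena.
--     cadena_busqueda (str): La cadena de caracteres que se buscará en el texto.
--
--     Retorna:
--     str: El substring desde el inicio hasta el final de la primera coincidencia de la cadena buscada,
--     incluyendo la coincidencia. Si no se encuentra ninguna coincidencia, devuelve una cadena vacía.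
--     """
--     # Buscar la posición de la primera coincidencia de la cadena en el texto
--     indice = texto.find(cadena_busqueda)
--
--     if indice != -1:
--         # Devolver el substring desde el inicio hasta el final de la coincidencia
--         return texto[:indice + len(cadena_busqueda)]
--     else:
--         # Devolver una cadena vacía si no hay coincidencia
--         return ""
--
-- def ajustar_contexto(texto, max_longitud=15000, secuencia="<|start_header_id|>", system_end="<|eot_id|>"):
--     system_prompt = encontrar_coincidencia(texto, system_end)
--     # Comprobar si la longitud del texto es mayor que el máximo permitido
--     if len(texto) > max_longitud:
--         indice_secuencia = 0
--
--         while True: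
--             # Buscar la secuencia de ajuste
--             indice_secuencia = texto.find(secuencia, indice_secuencia + 1)
--
--             # Si la secuencia no se encuentra o el texto restante es menor que la longitud máxima
--             if indice_secuencia == -1 or len(system_prompt) + len(texto) - indice_secuencia <= max_longitud:
--                 break
--
--         # Si encontramos una secuencia válida
--         if indice_secuencia != -1:
--             return system_prompt + texto[indice_secuencia:]
--
--         else:
--             # Si no se encuentra ninguna secuencia adecuada, tomar los últimos max_longitud caracteres
--             return system_prompt + texto[-max_longitud + len(system_prompt):]
--     else:
--         return system_prompt + texto
-- ===== SOURCE B (Python) =====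
-- def ajustar_contexto(texto, max_longitud=15000, secuencia="<|start_header_id|>", system_end="<|eot_id|>"):
--     # system prompt = everything up to and including the first system_end, else ""
--     fin = texto.find(system_end)
--     system_prompt = texto[:fin + len(system_end)] if fin != -1 else ""
--     if len(texto) <= max_longitud:
--         return system_prompt + texto
--     # smallest cut position whose tail (plus the system prompt) fits; locate it in one find
--     umbral = len(system_prompt) + len(texto) - max_longitud
--     indice = texto.find(secuencia, max(1, umbral))
--     if indice != -1:
--         return system_prompt + texto[indice:]
--     return system_prompt + texto[-max_longitud + len(system_prompt):]
-- ===== Notes on version B (the rewrite author's own statement) =====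
-- stated objective: simpler
-- what changed: Replaces A's while-loop that enumerates every occurrence of the sequence with a single arithmetic threshold computation and one find() call starting at max(1, threshold).
import Mathlib
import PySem

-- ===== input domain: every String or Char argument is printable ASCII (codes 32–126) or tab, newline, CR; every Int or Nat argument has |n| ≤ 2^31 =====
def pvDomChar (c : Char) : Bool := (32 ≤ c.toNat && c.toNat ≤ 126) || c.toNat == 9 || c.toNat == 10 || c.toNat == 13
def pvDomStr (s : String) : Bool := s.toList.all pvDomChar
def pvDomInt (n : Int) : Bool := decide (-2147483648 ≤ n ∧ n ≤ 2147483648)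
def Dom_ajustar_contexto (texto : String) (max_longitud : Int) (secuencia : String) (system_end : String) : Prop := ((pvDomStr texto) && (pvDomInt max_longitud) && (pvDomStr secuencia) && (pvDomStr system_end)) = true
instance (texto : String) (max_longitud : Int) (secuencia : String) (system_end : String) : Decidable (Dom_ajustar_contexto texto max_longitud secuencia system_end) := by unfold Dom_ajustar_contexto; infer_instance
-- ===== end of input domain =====

-- B replaces A's occurrence-enumerating while-loop by one arithmetic threshold and a single find(); simpler, same results.


-- ===== PORT A =====
def encontrar_coincidencia (texto : String) (cadena_busqueda : String) : String :=
  let indice := PySem.Str.find texto cadena_busqueda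
  if indice ≠ -1 then
    PySem.Str.slice texto none (some (indice + PySem.Str.len cadena_busqueda))
  else
    ""

-- the 'while True' of A; fuel only makes the recursion total (never reached when fuel ≥ len(texto)+2-indice)
def ajusteWhile (texto secuencia : String) (splen max_longitud : Int) (indice : Int) : Nat → Int
  | 0 => -1
  | fuel + 1 =>
    let j := PySem.Str.findFrom texto secuencia (indice + 1) none
    if j = -1 ∨ splen + PySem.Str.len texto - j ≤ max_longitud then j
    else ajusteWhile texto secuencia splen max_longitud j fuel

def ajustar_contexto (texto : String) (max_longitud : Int) (secuencia : String) (system_end : String) : String :=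
  let system_prompt := encontrar_coincidencia texto system_end
  if PySem.Str.len texto > max_longitud then
    let indice_secuencia := ajusteWhile texto secuencia (PySem.Str.len system_prompt) max_longitud 0 (texto.length + 2)
    if indice_secuencia ≠ -1 then
      system_prompt ++ PySem.Str.slice texto (some indice_secuencia) none
    else
      system_prompt ++ PySem.Str.slice texto (some (-max_longitud + PySem.Str.len system_prompt)) none
  else
    system_prompt ++ texto

-- ===== PORT B =====
def ajustar_contexto_alt (texto : String) (max_longitud : Int) (secuencia : String) (system_end : String) : String :=
  let fin := PySem.Str.find texto system_end
  let system_prompt :=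
    if fin ≠ -1 then PySem.Str.slice texto none (some (fin + PySem.Str.len system_end)) else ""
  if PySem.Str.len texto ≤ max_longitud then
    system_prompt ++ texto
  else
    let umbral := PySem.Str.len system_prompt + PySem.Str.len texto - max_longitud
    let indice := PySem.Str.findFrom texto secuencia (max 1 umbral) none
    if indice ≠ -1 then
      system_prompt ++ PySem.Str.slice texto (some indice) none
    else
      system_prompt ++ PySem.Str.slice texto (some (-max_longitud + PySem.Str.len system_prompt)) none

-- ===== PRECONDITION & SPEC =====
def Spec_ajustar_contexto (texto : String) (max_longitud : Int) (secuencia : String) (system_end : String) (out : String) : Prop := out = ajustar_contexto_alt texto max_longitud secuencia system_end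
instance (texto : String) (max_longitud : Int) (secuencia : String) (system_end : String) (out : String) : Decidable (Spec_ajustar_contexto texto max_longitud secuencia system_end out) := by unfold Spec_ajustar_contexto; infer_instance

-- ===== CLAIM (what is proved, stated in full; the proofs are below) =====
def Claim_equal_ajustar_contexto : Prop := ∀ (texto : String) (max_longitud : Int) (secuencia : String) (system_end : String), Dom_ajustar_contexto texto max_longitud secuencia system_end → Spec_ajustar_contexto texto max_longitud secuencia system_end (ajustar_contexto texto max_longitud secuencia system_end)

-- ===== LEMMAS AND PROOFS =====

-- findFrom with a start past the end is -1 (CPython quirk, kept by PySem)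
theorem findFrom_gt_len (s sub : List Char) (st : Int) (h : (s.length : Int) < st) :
    PySem.Chars.findFrom s sub st none = -1 := by
  simp only [PySem.Chars.findFrom]
  have h0 : ¬ st < 0 := by omega
  simp only [h0, if_false, if_pos h]

theorem findFrom_le_len (s sub : List Char) (a : Int) (h0 : 0 ≤ a) :
    PySem.Chars.findFrom s sub a none ≤ (s.length : Int) := by
  by_cases hle : a ≤ (s.length : Int)
  · have ha : a = ((a.toNat : Nat) : Int) := (Int.toNat_of_nonneg h0).symm
    rw [ha, PySem.Chars.findFrom_natCast s sub a.toNat (by omega)]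
    have := PySem.Chars.find_le_length (List.drop a.toNat s) sub
    simp only [List.length_drop] at this
    split_ifs with hf
    · omega
    · omega
  · rw [findFrom_gt_len s sub a (by omega)]; omega

theorem findFrom_ge (s sub : List Char) (a : Int) (h0 : 0 ≤ a)
    (hne : PySem.Chars.findFrom s sub a none ≠ -1) :
    a ≤ PySem.Chars.findFrom s sub a none := by
  by_cases hle : a ≤ (s.length : Int)
  · have ha : a = ((a.toNat : Nat) : Int) := (Int.toNat_of_nonneg h0).symm
    rw [ha] at hne ⊢
    exact (PySem.Chars.findFrom_natCast_spec s sub a.toNat (by omega) hne).1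
  · exact absurd (findFrom_gt_len s sub a (by omega)) hne

-- if nothing is found from a, nothing is found from any b ≥ a
theorem findFrom_mono_neg (s sub : List Char) (a b : Int) (h0 : 0 ≤ a) (hab : a ≤ b)
    (h : PySem.Chars.findFrom s sub a none = -1) :
    PySem.Chars.findFrom s sub b none = -1 := by
  by_cases hbl : b ≤ (s.length : Int)
  · have ha : a = ((a.toNat : Nat) : Int) := (Int.toNat_of_nonneg h0).symm
    have hb : b = ((b.toNat : Nat) : Int) := (Int.toNat_of_nonneg (by omega)).symm
    rw [ha] at h
    rw [hb]
    rw [PySem.Chars.findFrom_natCast_eq_neg_one_iff s sub a.toNat (by omega)] at h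
    rw [PySem.Chars.findFrom_natCast_eq_neg_one_iff s sub b.toNat (by omega)]
    intro hinf
    apply h
    have hdd : List.drop b.toNat s = List.drop (b.toNat - a.toNat) (List.drop a.toNat s) := by
      rw [List.drop_drop]; congr 1; omega
    exact hinf.trans (by rw [hdd]; exact (List.drop_suffix _ _).isInfix)
  · exact findFrom_gt_len s sub b (by omega)
-- if the result from a is >= b >= a, searching from b finds the same position
theorem findFrom_stable (s sub : List Char) (a b : Int) (h0 : 0 ≤ a) (hab : a ≤ b)
    (hne : PySem.Chars.findFrom s sub a none ≠ -1)
    (hbl : b ≤ PySem.Chars.findFrom s sub a none) :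
    PySem.Chars.findFrom s sub b none = PySem.Chars.findFrom s sub a none := by
  have hja := findFrom_ge s sub a h0 hne
  have hjl := findFrom_le_len s sub a h0
  obtain ⟨na, rfl⟩ : ∃ n : Nat, a = (n : Int) := ⟨a.toNat, (Int.toNat_of_nonneg h0).symm⟩
  obtain ⟨nb, rfl⟩ : ∃ n : Nat, b = (n : Int) := ⟨b.toNat, (Int.toNat_of_nonneg (by omega)).symm⟩
  have hna : na ≤ s.length := by omega
  obtain ⟨hka, hpre, hmin⟩ := PySem.Chars.findFrom_natCast_spec s sub na hna hne
  set j := PySem.Chars.findFrom s sub ((na : Nat) : Int) none with hjdef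
  have hj0 : 0 ≤ j := le_trans (Int.natCast_nonneg na) hka
  have hnb : nb ≤ s.length := by omega
  have hnbj : nb ≤ j.toNat := by omega
  have hsuff : List.drop j.toNat s <:+: List.drop nb s := by
    have hdd : List.drop j.toNat s = List.drop (j.toNat - nb) (List.drop nb s) := by
      rw [List.drop_drop]; congr 1; omega
    rw [hdd]; exact (List.drop_suffix _ _).isInfix
  have hbne : PySem.Chars.findFrom s sub ((nb : Nat) : Int) none ≠ -1 := by
    intro hEq
    exact (PySem.Chars.findFrom_natCast_eq_neg_one_iff s sub nb hnb).mp hEq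
      (hpre.isInfix.trans hsuff)
  obtain ⟨hkb, hpreb, hminb⟩ := PySem.Chars.findFrom_natCast_spec s sub nb hnb hbne
  set j' := PySem.Chars.findFrom s sub ((nb : Nat) : Int) none with hj'def
  have hj'0 : 0 ≤ j' := le_trans (Int.natCast_nonneg nb) hkb
  rcases lt_trichotomy j'.toNat j.toNat with hlt | heq | hgt
  · exact absurd hpreb (hmin j'.toNat (by omega) hlt)
  · omega
  · exact absurd hpre (hminb j.toNat (by omega) hgt)

-- the while-loop of A computes exactly one find from max 1 umbral
theorem ajusteWhile_eq (texto secuencia : String) (splen max_longitud : Int) :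
    ∀ (fuel : Nat) (i : Int), 0 ≤ i →
      i + 1 ≤ max 1 (splen + PySem.Str.len texto - max_longitud) →
      (texto.toList.length : Int) + 1 ≤ i + fuel →
      ajusteWhile texto secuencia splen max_longitud i fuel =
        PySem.Str.findFrom texto secuencia (max 1 (splen + PySem.Str.len texto - max_longitud)) none := by
  intro fuel
  induction fuel with
  | zero =>
    intro i h0 hle hfuel
    simp only [ajusteWhile]
    have : (texto.toList.length : Int) < max 1 (splen + PySem.Str.len texto - max_longitud) := by omega
    simp only [PySem.Str.findFrom_eq]
    exact (findFrom_gt_len texto.toList secuencia.toList _ this).symm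
  | succ fuel ih =>
    intro i h0 hle hfuel
    simp only [ajusteWhile, PySem.Str.findFrom_eq]
    set m := max 1 (splen + PySem.Str.len texto - max_longitud) with hm
    set j := PySem.Chars.findFrom texto.toList secuencia.toList (i + 1) none with hj
    by_cases hj1 : j = -1
    · rw [if_pos (Or.inl hj1), hj1]
      have hj1' : PySem.Chars.findFrom texto.toList secuencia.toList (i + 1) none = -1 := by
        rw [← hj]; exact hj1
      exact (findFrom_mono_neg texto.toList secuencia.toList (i + 1) m (by omega) hle hj1').symm
    · have hge := findFrom_ge texto.toList secuencia.toList (i + 1) (by omega) hj1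
      rw [← hj] at hge
      by_cases hcond : splen + PySem.Str.len texto - j ≤ max_longitud
      · rw [if_pos (Or.inr hcond)]
        have hmj : m ≤ j := by
          have : splen + PySem.Str.len texto - max_longitud ≤ j := by omega
          omega
        exact (findFrom_stable texto.toList secuencia.toList (i + 1) m (by omega) hle hj1 hmj).symm
      · rw [if_neg (by rintro (h | h); exacts [hj1 h, hcond h])]
        have hjlen := findFrom_le_len texto.toList secuencia.toList (i + 1) (by omega)
        rw [← hj] at hjlen
        have := ih j (by omega) (by omega) (by omega)
        simpa only [PySem.Str.findFrom_eq, ← hm] using this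

-- ===== VERDICT (by name: the statement is the Claim_ definition above) =====
theorem ajustar_contexto_spec : Claim_equal_ajustar_contexto := by
  intro texto max_longitud secuencia system_end _
  unfold Spec_ajustar_contexto ajustar_contexto ajustar_contexto_alt encontrar_coincidencia
  simp only
  set sp := (if PySem.Str.find texto system_end ≠ -1 then
      PySem.Str.slice texto none (some (PySem.Str.find texto system_end + PySem.Str.len system_end))
    else "") with hsp
  by_cases hbig : PySem.Str.len texto > max_longitud
  · rw [if_pos hbig,
      ajusteWhile_eq texto secuencia (PySem.Str.len sp) max_longitud (texto.length + 2) 0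
        (by omega) (by omega) (by simp),
      if_neg (not_le.mpr hbig)]
  · rw [if_neg hbig, if_pos (not_lt.mp hbig)]
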